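-- pv_equiv track=rewrite | github.com/quocthai9120/UW-NLP-Capstone-SP22 | train_helper.py | trigram
-- ===== SOURCE A (Python) =====
-- def trigram(train_data, unknown_chars):
--     count_dict = {} # NOTE: this is a nested dictionary
--     for line in train_data:
--         tok_1, tok_2 = '<start>', '<start>'
--         for token in line:
--             if token in unknown_chars:
--                 token = '<unk>'
--             base_str = tok_1 + tok_2
--             if base_str not in count_dict:
--                 count_dict[base_str] = {}
--             count_dict[base_str][token] = count_dict[base_str][token] + 1 if token in count_dict[base_str] else 1
--             tok_1 = tok_2
--             tok_2 = token
--         base_str = tok_1 + tok_2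
--         if base_str not in count_dict:
--                 count_dict[base_str] = {}
--         count_dict[base_str]['<stop>'] = count_dict[base_str]['<stop>'] + 1 if '<stop>' in count_dict[base_str] else 1
--     sum_map = {}
--     for sequence in count_dict:
--         ch_map = count_dict[sequence]
--         count_seq = sum(ch_map.values())
--         sum_map[sequence] = count_seq
--
--     return sum_map, count_dict
-- ===== SOURCE B (Python) =====
-- def trigram(train_data, unknown_chars):
--     # pipeline: build the explicit list of (context, token) trigram events by
--     # windowing each padded line, then aggregate counts and totals from it
--     events = []
--     for line in train_data:
--         toks = ['<start>', '<start>'] \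
--             + ['<unk>' if t in unknown_chars else t for t in line] \
--             + ['<stop>']
--         events.extend((a + b, c) for a, b, c in zip(toks, toks[1:], toks[2:]))
--     count_dict = {}
--     for base, tok in events:
--         inner = count_dict.setdefault(base, {})
--         inner[tok] = inner.get(tok, 0) + 1
--     sum_map = {}
--     for base, _ in events:
--         sum_map[base] = sum_map.get(base, 0) + 1
--     return sum_map, count_dict
-- ===== Notes on version B (the rewrite author's own statement) =====
-- stated objective: alternative
-- what changed: B replaces A's stateful tok_1/tok_2 sliding loop plus post-hoc re-summation by a staged pipeline: it first materialises the explicit list of (context, token) trigram events by zipping three shifted views of each padded line, then builds count_dict and sum_map by two independent aggregation folds over that event list.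
import Mathlib
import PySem

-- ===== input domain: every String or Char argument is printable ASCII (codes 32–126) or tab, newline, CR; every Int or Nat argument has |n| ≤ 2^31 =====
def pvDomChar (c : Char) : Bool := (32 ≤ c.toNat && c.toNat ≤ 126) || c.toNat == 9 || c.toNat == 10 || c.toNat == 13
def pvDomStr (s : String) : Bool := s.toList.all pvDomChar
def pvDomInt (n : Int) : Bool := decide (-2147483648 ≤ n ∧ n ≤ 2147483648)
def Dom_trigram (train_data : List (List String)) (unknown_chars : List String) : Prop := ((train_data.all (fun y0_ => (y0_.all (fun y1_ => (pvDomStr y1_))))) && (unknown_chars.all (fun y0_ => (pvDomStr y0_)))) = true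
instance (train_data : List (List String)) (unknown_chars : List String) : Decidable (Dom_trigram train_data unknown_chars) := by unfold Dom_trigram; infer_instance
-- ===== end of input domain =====

-- B replaces A's stateful sliding-context loop and post-hoc re-summation by a staged
-- pipeline: materialise the (context, token) event list by windowing each padded line,
-- then aggregate count_dict and sum_map by two independent folds (objective: alternative).

-- ===== PORT A =====
-- inner token-loop body of A
def trigramStep (unknown_chars : List String)
    (st : PySem.Dict String (PySem.Dict String Int) × String × String) (token : String) :
    PySem.Dict String (PySem.Dict String Int) × String × String :=
  let token := if unknown_chars.contains token then "<unk>" else token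
  let base_str := st.2.1 ++ st.2.2
  let count_dict := if st.1.contains base_str then st.1 else st.1.insert base_str PySem.Dict.empty
  let inner := count_dict.getD base_str PySem.Dict.empty
  (count_dict.insert base_str
      (inner.insert token (if inner.contains token then inner.getD token 0 + 1 else 1)),
   st.2.2, token)

-- one iteration of A's outer loop over train_data
def trigramLine (unknown_chars : List String)
    (count_dict : PySem.Dict String (PySem.Dict String Int)) (line : List String) :
    PySem.Dict String (PySem.Dict String Int) :=
  let st := line.foldl (trigramStep unknown_chars) (count_dict, "<start>", "<start>")
  let base_str := st.2.1 ++ st.2.2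
  let cd := if st.1.contains base_str then st.1 else st.1.insert base_str PySem.Dict.empty
  let inner := cd.getD base_str PySem.Dict.empty
  cd.insert base_str
    (inner.insert "<stop>" (if inner.contains "<stop>" then inner.getD "<stop>" 0 + 1 else 1))

def trigram (train_data : List (List String)) (unknown_chars : List String) :
    (List (String × Int)) × (List (String × List (String × Int))) :=
  let count_dict := train_data.foldl (trigramLine unknown_chars) PySem.Dict.empty
  let sum_map := count_dict.items.foldl
      (fun sm p => sm.insert p.1 p.2.values.sum) PySem.Dict.empty
  (sum_map.items, count_dict.items.map (fun p => (p.1, p.2.items)))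

-- ===== PORT B =====
-- B's count update: "inner = count_dict.setdefault(base, {}); inner[tok] = inner.get(tok, 0) + 1"
def bump (cd : PySem.Dict String (PySem.Dict String Int)) (b t : String) :
    PySem.Dict String (PySem.Dict String Int) :=
  let cd := cd.setdefault b PySem.Dict.empty
  let inner := cd.getD b PySem.Dict.empty
  cd.insert b (inner.insert t (inner.getD t 0 + 1))

-- events of one line: pad, then zip three shifted views (zip(toks, toks[1:], toks[2:]))
def altEvents (unknown_chars : List String) (line : List String) : List (String × String) :=
  let toks := "<start>" :: "<start>" ::
    (line.map (fun t => if unknown_chars.contains t then "<unk>" else t) ++ ["<stop>"])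
  ((toks.zip (toks.drop 1)).zip (toks.drop 2)).map (fun p => (p.1.1 ++ p.1.2, p.2))

def trigram_alt (train_data : List (List String)) (unknown_chars : List String) :
    (List (String × Int)) × (List (String × List (String × Int))) :=
  let events := train_data.foldl (fun ev line => ev ++ altEvents unknown_chars line) []
  let count_dict := events.foldl (fun cd e => bump cd e.1 e.2) PySem.Dict.empty
  let sum_map := events.foldl (fun sm e => sm.insert e.1 (sm.getD e.1 0 + 1)) PySem.Dict.empty
  (sum_map.items, count_dict.items.map (fun p => (p.1, p.2.items)))

-- ===== PRECONDITION & SPEC =====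
def Spec_trigram (train_data : List (List String)) (unknown_chars : List String) (out : (List (String × Int)) × (List (String × List (String × Int)))) : Prop := out = trigram_alt train_data unknown_chars
instance (train_data : List (List String)) (unknown_chars : List String) (out : (List (String × Int)) × (List (String × List (String × Int)))) : Decidable (Spec_trigram train_data unknown_chars out) := by unfold Spec_trigram; infer_instance

-- ===== CLAIM (what is proved, stated in full; the proofs are below) =====
def Claim_equal_trigram : Prop := ∀ (train_data : List (List String)) (unknown_chars : List String), Dom_trigram train_data unknown_chars → Spec_trigram train_data unknown_chars (trigram train_data unknown_chars)

-- ===== LEMMAS AND PROOFS =====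

-- the trigram event list of a token sequence, as a recursion (proof-side view of altEvents)
def events3 : List String → List (String × String)
  | a :: b :: c :: rest => (a ++ b, c) :: events3 (b :: c :: rest)
  | _ => []

theorem altEvents_eq_events3_aux (toks : List String) :
    ((toks.zip (toks.drop 1)).zip (toks.drop 2)).map (fun p => (p.1.1 ++ p.1.2, p.2))
      = events3 toks :=
  match toks with
  | [] => rfl
  | [_] => rfl
  | [_, _] => rfl
  | a :: b :: c :: rest => by
      have ih := altEvents_eq_events3_aux (b :: c :: rest)
      simpa [events3, List.zip_cons_cons] using ih

theorem altEvents_eq (unk : List String) (line : List String) :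
    altEvents unk line = events3 ("<start>" :: "<start>" ::
      (line.map (fun t => if unk.contains t then "<unk>" else t) ++ ["<stop>"])) :=
  altEvents_eq_events3_aux _

-- invariant on count_dict: outer keys and every inner dict's keys are duplicate-free
def Good (cd : PySem.Dict String (PySem.Dict String Int)) : Prop :=
  cd.keys.Nodup ∧ ∀ p ∈ cd.items, p.2.keys.Nodup

-- the dict A's second pass computes, as a function of count_dict
def sumDict (cd : PySem.Dict String (PySem.Dict String Int)) : PySem.Dict String Int :=
  PySem.Dict.mk (cd.items.map (fun p => (p.1, p.2.values.sum)))

theorem entry_mem {ν : Type} (d : PySem.Dict String ν) (b : String) (d0 : ν)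
    (hb : d.contains b = true) (hnd : d.keys.Nodup) : (b, d.getD b d0) ∈ d.items := by
  have hbk : b ∈ d.keys := (PySem.Dict.contains_iff_mem_keys d b).mp hb
  have : b ∈ d.items.map Prod.fst := by simpa [PySem.Dict.keys] using hbk
  obtain ⟨p, hp, hfst⟩ := List.mem_map.mp this
  have hpm : (b, p.2) ∈ d.items := by rw [← hfst]; exact hp
  rw [PySem.Dict.getD_of_mem_items d hpm hnd d0]
  exact hpm

theorem bumpA_eq (cd : PySem.Dict String (PySem.Dict String Int)) (b t : String) :
    (let cd' := if cd.contains b then cd else cd.insert b PySem.Dict.empty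
     let inner := cd'.getD b PySem.Dict.empty
     cd'.insert b (inner.insert t (if inner.contains t then inner.getD t 0 + 1 else 1)))
    = bump cd b t := by
  unfold bump
  dsimp only
  by_cases hc : cd.contains b = true
  · rw [PySem.Dict.setdefault_of_contains _ _ hc]
    simp only [hc, if_true]
    by_cases hct : (cd.getD b PySem.Dict.empty).contains t = true
    · simp [hct]
    · simp [hct, PySem.Dict.getD_of_not_contains _ _ (by simpa using hct)]
  · rw [PySem.Dict.setdefault_of_not_contains _ _ (by simpa using hc)]
    simp only [hc]
    simp [PySem.Dict.getD_insert_self]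

theorem sum_snd_map_update (l : List (String × Int)) (t : String) (v : Int)
    (hnd : (l.map Prod.fst).Nodup) (hmem : (t, v) ∈ l) :
    ((l.map (fun p => if p.1 == t then (t, v + 1) else p)).map Prod.snd).sum
      = (l.map Prod.snd).sum + 1 := by
  induction l with
  | nil => cases hmem
  | cons p rest ih =>
    simp only [List.map_cons, List.nodup_cons] at hnd
    by_cases hp : p.1 = t
    · have hpv : p = (t, v) := by
        rcases List.mem_cons.mp hmem with h1 | h2
        · exact h1.symm
        · exact absurd (by rw [hp]; exact List.mem_map.mpr ⟨(t, v), h2, rfl⟩) hnd.1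
      subst hpv
      have hrest : ∀ q ∈ rest, (if q.1 == t then (t, v + 1) else q) = q := by
        intro q hq
        have hqt : q.1 ≠ t := fun e => hnd.1 (by rw [← hp, ← e]; exact List.mem_map.mpr ⟨q, hq, rfl⟩)
        simp [hqt]
      have h2 : rest.map (fun q => if q.1 == t then (t, v + 1) else q) = rest :=
        (List.map_congr_left hrest).trans (List.map_id _)
      simp only [List.map_cons, beq_self_eq_true, if_true, h2, List.sum_cons]
      omega
    · have hmem' : (t, v) ∈ rest := by
        rcases List.mem_cons.mp hmem with h1 | h2
        · exact absurd (by rw [← h1]) hp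
        · exact h2
      have hne : (p.1 == t) = false := by simp [hp]
      have hih := ih hnd.2 hmem'
      simp only [List.map_cons, hne, Bool.false_eq_true, if_false, List.sum_cons]
      omega

theorem values_sum_inc (m : PySem.Dict String Int) (hm : m.keys.Nodup) (t : String) :
    (m.insert t (m.getD t 0 + 1)).values.sum = m.values.sum + 1 := by
  by_cases hc : m.contains t = true
  · have hmem : (t, m.getD t 0) ∈ m.items := entry_mem m t 0 hc hm
    have hnd : (m.items.map Prod.fst).Nodup := by
      simpa [PySem.Dict.keys] using hm
    simp only [PySem.Dict.values, PySem.Dict.items_insert_of_contains _ _ hc]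
    exact sum_snd_map_update m.items t (m.getD t 0) hnd hmem
  · have hc' : m.contains t = false := by simpa using hc
    simp [PySem.Dict.values, PySem.Dict.items_insert_of_not_contains _ _ hc',
          PySem.Dict.getD_of_not_contains _ _ hc']

theorem keys_sumDict (cd : PySem.Dict String (PySem.Dict String Int)) :
    (sumDict cd).keys = cd.keys := by
  simp [sumDict, PySem.Dict.keys, List.map_map]

theorem good_bump (cd : PySem.Dict String (PySem.Dict String Int)) (b t : String)
    (h : Good cd) : Good (bump cd b t) := by
  obtain ⟨h1, h2⟩ := h
  have hsd : Good (cd.setdefault b PySem.Dict.empty) := by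
    by_cases hc : cd.contains b = true
    · rw [PySem.Dict.setdefault_of_contains _ _ hc]; exact ⟨h1, h2⟩
    · rw [PySem.Dict.setdefault_of_not_contains _ _ (by simpa using hc)]
      refine ⟨PySem.Dict.nodup_keys_insert _ _ _ h1, fun p hp => ?_⟩
      rcases (PySem.Dict.mem_items_insert _ _ _ _).mp hp with h3 | h3
      · subst h3; simp [PySem.Dict.keys_empty]
      · exact h2 p h3.1
  unfold bump
  dsimp only
  obtain ⟨g1, g2⟩ := hsd
  refine ⟨PySem.Dict.nodup_keys_insert _ _ _ g1, fun p hp => ?_⟩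
  rcases (PySem.Dict.mem_items_insert _ _ _ _).mp hp with h3 | h3
  · subst h3
    refine PySem.Dict.nodup_keys_insert _ _ _ ?_
    by_cases hcb : (cd.setdefault b PySem.Dict.empty).contains b = true
    · have := entry_mem (cd.setdefault b PySem.Dict.empty) b PySem.Dict.empty hcb g1
      exact g2 _ this
    · rw [PySem.Dict.getD_of_not_contains _ _ (by simpa using hcb)]
      simp [PySem.Dict.keys_empty]
  · exact g2 p h3.1

theorem sumDict_bump (cd : PySem.Dict String (PySem.Dict String Int)) (b t : String)
    (h : Good cd) :
    sumDict (bump cd b t) = (sumDict cd).insert b ((sumDict cd).getD b 0 + 1) := by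
  obtain ⟨h1, h2⟩ := h
  have hctr : (sumDict cd).contains b = cd.contains b := by
    rw [PySem.Dict.contains_eq_decide_mem_keys, PySem.Dict.contains_eq_decide_mem_keys,
        keys_sumDict]
  by_cases hc : cd.contains b = true
  · have hmem : (b, cd.getD b PySem.Dict.empty) ∈ cd.items := entry_mem cd b _ hc h1
    have hndf : (cd.items.map Prod.fst).Nodup := by simpa [PySem.Dict.keys] using h1
    have hinner : (cd.getD b PySem.Dict.empty).keys.Nodup := h2 _ hmem
    have hbump : bump cd b t =
        cd.insert b ((cd.getD b PySem.Dict.empty).insert t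
          ((cd.getD b PySem.Dict.empty).getD t 0 + 1)) := by
      unfold bump; dsimp only; rw [PySem.Dict.setdefault_of_contains _ _ hc]
    have hsmem : (b, (cd.getD b PySem.Dict.empty).values.sum) ∈ (sumDict cd).items :=
      List.mem_map.mpr ⟨_, hmem, rfl⟩
    have hsnd : (sumDict cd).keys.Nodup := by rw [keys_sumDict]; exact h1
    have hgetDs : (sumDict cd).getD b 0 = (cd.getD b PySem.Dict.empty).values.sum :=
      PySem.Dict.getD_of_mem_items _ hsmem hsnd 0
    apply PySem.Dict.ext
    rw [hbump]
    show ((cd.insert b _).items.map _) = _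
    rw [PySem.Dict.items_insert_of_contains _ _ hc,
        PySem.Dict.items_insert_of_contains _ _ (hctr.trans hc)]
    show _ = ((cd.items.map _).map _)
    rw [List.map_map, List.map_map]
    refine List.map_congr_left (fun p hp => ?_)
    by_cases hpb : p.1 = b
    · have hpe : p = (b, cd.getD b PySem.Dict.empty) :=
        List.inj_on_of_nodup_map hndf hp hmem (by rw [hpb])
      have hv := values_sum_inc (cd.getD b PySem.Dict.empty) hinner t
      simp [Function.comp, hpe, hv, hgetDs]
    · have hne : (p.1 == b) = false := by simp [hpb]
      simp [Function.comp, hne]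
  · have hc' : cd.contains b = false := by simpa using hc
    have hbump : bump cd b t = cd.insert b (PySem.Dict.empty.insert t 1) := by
      unfold bump
      dsimp only
      rw [PySem.Dict.setdefault_of_not_contains _ _ hc', PySem.Dict.getD_insert_self,
          PySem.Dict.insert_insert_self]
      norm_num
    have hw : ((PySem.Dict.empty : PySem.Dict String Int).insert t 1).values.sum = 1 := rfl
    apply PySem.Dict.ext
    rw [hbump]
    show ((cd.insert b _).items.map _) = _
    rw [PySem.Dict.items_insert_of_not_contains _ _ hc',
        PySem.Dict.items_insert_of_not_contains _ _ (hctr.trans hc'),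
        PySem.Dict.getD_of_not_contains _ _ (hctr.trans hc')]
    simp only [List.map_append, List.map_cons, List.map_nil, hw]
    rfl

theorem stepA_eq_bump (unk : List String) (cd : PySem.Dict String (PySem.Dict String Int))
    (t1 t2 tok : String) :
    trigramStep unk (cd, t1, t2) tok =
      (bump cd (t1 ++ t2) (if unk.contains tok then "<unk>" else tok), t2,
       if unk.contains tok then "<unk>" else tok) := by
  have := bumpA_eq cd (t1 ++ t2) (if unk.contains tok then "<unk>" else tok)
  unfold trigramStep
  dsimp only
  rw [this]

-- A's per-line loop (including the trailing '<stop>' bump) folds bump over the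
-- event list of the padded line
theorem lineA_events (unk : List String) : ∀ (xs : List String)
    (cd : PySem.Dict String (PySem.Dict String Int)) (t1 t2 : String),
    (let st := xs.foldl (trigramStep unk) (cd, t1, t2)
     bump st.1 (st.2.1 ++ st.2.2) "<stop>")
    = (events3 (t1 :: t2 ::
        (xs.map (fun t => if unk.contains t then "<unk>" else t) ++ ["<stop>"]))).foldl
        (fun c e => bump c e.1 e.2) cd := by
  intro xs
  induction xs with
  | nil => intro cd t1 t2; simp [events3]
  | cons x rest ih =>
    intro cd t1 t2
    simp only [List.foldl_cons, List.map_cons, List.cons_append, events3]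
    rw [stepA_eq_bump unk cd t1 t2 x]
    exact ih _ t2 _

theorem trigramLine_events (unk : List String)
    (cd : PySem.Dict String (PySem.Dict String Int)) (line : List String) :
    trigramLine unk cd line = (altEvents unk line).foldl (fun c e => bump c e.1 e.2) cd := by
  unfold trigramLine
  dsimp only
  rw [bumpA_eq, altEvents_eq]
  exact lineA_events unk line cd "<start>" "<start>"

theorem countA_events (unk : List String) : ∀ (td : List (List String))
    (cd : PySem.Dict String (PySem.Dict String Int)),
    td.foldl (trigramLine unk) cd
      = (td.flatMap (altEvents unk)).foldl (fun c e => bump c e.1 e.2) cd := by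
  intro td
  induction td with
  | nil => intro cd; rfl
  | cons line rest ih =>
    intro cd
    simp only [List.foldl_cons, List.flatMap_cons, List.foldl_append]
    rw [trigramLine_events]
    exact ih _

theorem good_foldl_bump (evs : List (String × String)) :
    ∀ (cd : PySem.Dict String (PySem.Dict String Int)), Good cd →
    Good (evs.foldl (fun c e => bump c e.1 e.2) cd) := by
  induction evs with
  | nil => intro cd h; exact h
  | cons e rest ih => intro cd h; exact ih _ (good_bump _ _ _ h)

theorem sum_foldl_bump (evs : List (String × String)) :
    ∀ (cd : PySem.Dict String (PySem.Dict String Int)), Good cd →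
    evs.foldl (fun sm e => sm.insert e.1 (sm.getD e.1 0 + 1)) (sumDict cd)
      = sumDict (evs.foldl (fun c e => bump c e.1 e.2) cd) := by
  induction evs with
  | nil => intro cd _; rfl
  | cons e rest ih =>
    intro cd h
    simp only [List.foldl_cons]
    rw [← sumDict_bump cd e.1 e.2 h]
    exact ih _ (good_bump _ _ _ h)

theorem final_pass (cd : PySem.Dict String (PySem.Dict String Int)) (h : cd.keys.Nodup) :
    cd.items.foldl (fun sm p => sm.insert p.1 p.2.values.sum) PySem.Dict.empty = sumDict cd := by
  have hnd : (cd.items.map (fun p => p.1)).Nodup := by simpa [PySem.Dict.keys] using h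
  have hfold := PySem.Dict.items_foldl_insert_fresh cd.items (fun p => p.1)
    (fun p => p.2.values.sum) PySem.Dict.empty (fun a _ => by simp) hnd
  apply PySem.Dict.ext
  rw [hfold]
  rfl

-- ===== VERDICT (by name: the statement is the Claim_ definition above) =====
theorem trigram_spec : Claim_equal_trigram := by
  intro td unk _
  unfold Spec_trigram trigram trigram_alt
  dsimp only
  have hg : Good (PySem.Dict.empty : PySem.Dict String (PySem.Dict String Int)) := by
    constructor
    · simp [PySem.Dict.keys_empty]
    · intro p hp; simp [PySem.Dict.empty] at hp
  have hflat : td.foldl (fun ev line => ev ++ altEvents unk line) ([] : List (String × String))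
      = td.flatMap (altEvents unk) := by
    simpa using PySem.List.foldl_append_eq_flatMap (l := td) (g := altEvents unk)
      (acc := ([] : List (String × String)))
  rw [hflat, countA_events unk td PySem.Dict.empty]
  have h0 : (sumDict PySem.Dict.empty : PySem.Dict String Int) = PySem.Dict.empty := rfl
  rw [final_pass _ (good_foldl_bump _ _ hg).1, ← h0,
      sum_foldl_bump _ _ hg]
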